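-- pv_equiv track=rewrite | github.com/daniel-reich/ubiquitous-fiesta | ZJGBGyZRNrbNtXJok_11.py | nearest_vowel
-- ===== SOURCE A (Python) =====
-- def nearest_vowel(s):
--   vowels = 'aeiou'
--   a = 'abcdefghijklmnopqrstuvwxyz'
--   if s in vowels:
--     return s
--   for i in range(1,6):
--     if a.index(s)-i>=0 and a.index(s)+i<len(a):
--       if a[a.index(s)-i] in vowels and a[a.index(s)+i] in vowels:
--         return a[a.index(s)-i]
--     if a.index(s)-i>=0 and a[a.index(s)-i] in vowels:
--       return a[a.index(s)-i]
--     if a.index(s)+i<len(a) and a[a.index(s)+i] in vowels: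
--       return a[a.index(s)+i]
-- ===== SOURCE B (Python) =====
-- def nearest_vowel(s):
--   vowels = 'aeiou'
--   if s in vowels:
--     return s
--   a = 'abcdefghijklmnopqrstuvwxyz'
--   idx = a.index(s)
--   return min(vowels, key=lambda v: abs(a.index(v) - idx))
-- ===== Notes on version B (the rewrite author's own statement) =====
-- stated objective: simpler
-- what changed: Replaces the outward two-sided distance-expanding scan (i = 1..5 with three guarded window checks per step) by a single argmin pass over the five vowels keyed by absolute alphabet-index distance; the ascending vowel iteration order reproduces A's left-before-right tie-break.
-- intended difference: On multi-character alphabet substrings that start at a vowel yet are not substrings of the vowel string (the witness is such an input), A skips distance zero and returns a farther vowel, while B returns the vowel the substring starts at, which is the nearest vowel and hence the intended value. — e.g. on nearest_vowel("ef"): A returns some "a", B returns some "e"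
import Mathlib
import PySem

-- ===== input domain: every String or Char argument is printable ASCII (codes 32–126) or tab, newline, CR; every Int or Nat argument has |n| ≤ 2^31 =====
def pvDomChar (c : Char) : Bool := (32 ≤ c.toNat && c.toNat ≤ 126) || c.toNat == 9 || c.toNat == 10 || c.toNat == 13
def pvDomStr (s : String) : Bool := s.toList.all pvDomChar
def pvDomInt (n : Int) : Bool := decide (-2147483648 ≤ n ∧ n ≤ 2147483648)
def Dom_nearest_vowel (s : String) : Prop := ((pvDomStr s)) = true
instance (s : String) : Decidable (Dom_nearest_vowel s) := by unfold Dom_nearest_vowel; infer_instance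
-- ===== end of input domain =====

-- B replaces A's outward two-sided scan by a single argmin pass over the five vowels (same cost, simpler).


-- ===== PORT A =====
-- c in 'aeiou' for a single character
def nvVowel (c : Char) : Bool := "aeiou".toList.contains c

-- the body of A's 'for i in range(1,6)' loop; first satisfied branch returns, else next i
def nvLoopA (idx : Int) : List Int → Option String
  | [] => none
  | i :: rest =>
    let a := "abcdefghijklmnopqrstuvwxyz"
    if decide (idx - i ≥ 0) && decide (idx + i < (PySem.Str.len a : Int))
        && (PySem.Str.pyGet? a (idx - i)).any nvVowel && (PySem.Str.pyGet? a (idx + i)).any nvVowel then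
      (PySem.Str.pyGet? a (idx - i)).map (fun c => String.ofList [c])
    else if decide (idx - i ≥ 0) && (PySem.Str.pyGet? a (idx - i)).any nvVowel then
      (PySem.Str.pyGet? a (idx - i)).map (fun c => String.ofList [c])
    else if decide (idx + i < (PySem.Str.len a : Int)) && (PySem.Str.pyGet? a (idx + i)).any nvVowel then
      (PySem.Str.pyGet? a (idx + i)).map (fun c => String.ofList [c])
    else nvLoopA idx rest

def nearest_vowel (s : String) : Option String :=
  if PySem.Str.isIn s "aeiou" then some s
  else
    -- a.index(s): ValueError (find = -1) modelled as none, excluded by Pre_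
    let idx := PySem.Str.find "abcdefghijklmnopqrstuvwxyz" s
    if idx < 0 then none
    else nvLoopA idx (PySem.List.pyRange 1 6 1)

-- ===== PORT B =====
-- min('aeiou', key=lambda v: abs(a.index(v) - idx))
def nvMinB (idx : Int) : Option String :=
  (PySem.List.min? "aeiou".toList
    (fun v => |PySem.Str.find "abcdefghijklmnopqrstuvwxyz" (String.ofList [v]) - idx|)).map
    (fun c => String.ofList [c])

def nearest_vowel_alt (s : String) : Option String :=
  if PySem.Str.isIn s "aeiou" then some s
  else
    let idx := PySem.Str.find "abcdefghijklmnopqrstuvwxyz" s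
    if idx < 0 then none
    else nvMinB idx

-- ===== PRECONDITION & SPEC =====
-- Pre_ excludes exactly the inputs on which A raises ValueError (s neither a substring of 'aeiou' nor of the alphabet).
def Pre_nearest_vowel (s : String) : Prop :=
  PySem.Str.isIn s "aeiou" = true ∨ PySem.Str.isIn s "abcdefghijklmnopqrstuvwxyz" = true
instance (s : String) : Decidable (Pre_nearest_vowel s) := by unfold Pre_nearest_vowel; infer_instance
def pvWitness_nearest_vowel : String := "b"

-- On multi-character alphabet substrings that start at a vowel yet are not substrings of the vowel
-- string (the witness below is such an input), A skips distance zero and returns a farther vowel,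
-- while B returns the vowel the substring starts at — the nearest vowel, hence the intended value.
def D_nearest_vowel (s : String) : Prop :=
  2 ≤ s.toList.length ∧ PySem.Str.isIn s "aeiou" = false ∧
  PySem.Str.isIn s "abcdefghijklmnopqrstuvwxyz" = true ∧
  s.toList.head? ∈ [some 'a', some 'e', some 'i', some 'o', some 'u']
instance (s : String) : Decidable (D_nearest_vowel s) := by unfold D_nearest_vowel; infer_instance

def Spec_nearest_vowel (s : String) (out : Option String) : Prop :=
  ¬ D_nearest_vowel s → out = nearest_vowel_alt s
instance (s : String) (out : Option String) : Decidable (Spec_nearest_vowel s out) := by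
  unfold Spec_nearest_vowel; infer_instance

def pvDiffWitness_nearest_vowel : String := "ef"
def pvDiffWitnessOut_nearest_vowel : (Option String) × (Option String) := (some "a", some "e")

-- ===== CLAIM (what is proved, stated in full; the proofs are below) =====
def Claim_unchanged_nearest_vowel : Prop := ∀ (s : String), Dom_nearest_vowel s → Pre_nearest_vowel s → Spec_nearest_vowel s (nearest_vowel s)
def Claim_changed_nearest_vowel : Prop := Dom_nearest_vowel (pvDiffWitness_nearest_vowel) ∧ Pre_nearest_vowel (pvDiffWitness_nearest_vowel) ∧ D_nearest_vowel (pvDiffWitness_nearest_vowel) ∧ nearest_vowel (pvDiffWitness_nearest_vowel) = pvDiffWitnessOut_nearest_vowel.1 ∧ nearest_vowel_alt (pvDiffWitness_nearest_vowel) = pvDiffWitnessOut_nearest_vowel.2 ∧ pvDiffWitnessOut_nearest_vowel.1 ≠ pvDiffWitnessOut_nearest_vowel.2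
def Claim_exact_nearest_vowel : Prop := ∀ (s : String), Dom_nearest_vowel s → Pre_nearest_vowel s → D_nearest_vowel s → nearest_vowel s ≠ nearest_vowel_alt s

-- ===== LEMMAS AND PROOFS =====

-- both post-guard computations depend only on idx; compare them for each possible idx
lemma nv_core (idx : Int) (h0 : 0 ≤ idx) (h26 : idx < 26) :
    (nvVowel ("abcdefghijklmnopqrstuvwxyz".toList.getD idx.toNat 'z') = false →
      nvLoopA idx (PySem.List.pyRange 1 6 1) = nvMinB idx) ∧
    (nvVowel ("abcdefghijklmnopqrstuvwxyz".toList.getD idx.toNat 'z') = true →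
      nvLoopA idx (PySem.List.pyRange 1 6 1) ≠ nvMinB idx) := by
  interval_cases idx <;> exact ⟨by decide, by decide⟩

-- a successful find on a nonempty needle: the index is < 26 and points at the needle's first character
lemma nv_find_facts (c : Char) (t : List Char)
    (hf : 0 ≤ PySem.Chars.find "abcdefghijklmnopqrstuvwxyz".toList (c :: t)) :
    PySem.Chars.find "abcdefghijklmnopqrstuvwxyz".toList (c :: t) < 26 ∧
    "abcdefghijklmnopqrstuvwxyz".toList.getD
      (PySem.Chars.find "abcdefghijklmnopqrstuvwxyz".toList (c :: t)).toNat 'z' = c := by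
  obtain ⟨u, hu⟩ := (PySem.Chars.find_spec hf).1
  have hdrop : "abcdefghijklmnopqrstuvwxyz".toList.drop
      (PySem.Chars.find "abcdefghijklmnopqrstuvwxyz".toList (c :: t)).toNat = c :: (t ++ u) := by
    rw [← hu]; simp
  have hlt : (PySem.Chars.find "abcdefghijklmnopqrstuvwxyz".toList (c :: t)).toNat
      < "abcdefghijklmnopqrstuvwxyz".toList.length := by
    by_contra hge
    rw [not_lt] at hge
    have h := List.drop_eq_nil_of_le hge
    rw [hdrop] at h
    exact List.cons_ne_nil _ _ h
  refine ⟨?_, ?_⟩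
  · have h26 : "abcdefghijklmnopqrstuvwxyz".toList.length = 26 := by decide
    omega
  · have h0 : ("abcdefghijklmnopqrstuvwxyz".toList.drop
        (PySem.Chars.find "abcdefghijklmnopqrstuvwxyz".toList (c :: t)).toNat).head?
        = some c := by rw [hdrop]; rfl
    rw [List.head?_drop] at h0
    rw [List.getD_eq_getElem?_getD, h0]
    rfl

-- a string whose character list is [c] with c a vowel is a substring of 'aeiou'
lemma nv_singleton_vowel_isIn (s : String) (c : Char) (hs : s.toList = [c])
    (hc : c ∈ "aeiou".toList) : PySem.Str.isIn s "aeiou" = true := by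
  rw [PySem.Str.isIn_iff_infix, hs]
  obtain ⟨l1, l2, hl⟩ := List.append_of_mem hc
  exact ⟨l1, l2, by rw [hl]; simp⟩

-- ===== VERDICT (by name: the statement is the Claim_ definition above) =====
theorem nearest_vowel_spec : Claim_unchanged_nearest_vowel := by
  intro s _ hpre hnd
  simp only [nearest_vowel, nearest_vowel_alt]
  by_cases hv : PySem.Str.isIn s "aeiou" = true
  · have hb : PySem.Str.isIn s "aeiou" = PySem.Chars.isIn s.toList ['a', 'e', 'i', 'o', 'u'] := by simp
    rw [hb] at hv
    simp [hv]
  · have hv' : PySem.Str.isIn s "aeiou" = false := by simpa using hv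
    have ha : PySem.Str.isIn s "abcdefghijklmnopqrstuvwxyz" = true := by
      rcases hpre with h | h
      · exact absurd h hv
      · exact h
    have hf : 0 ≤ PySem.Str.find "abcdefghijklmnopqrstuvwxyz" s := by
      rw [PySem.Str.find_nonneg_iff]
      rw [PySem.Str.isIn_iff_infix] at ha
      exact ha
    simp only [hv', Bool.false_eq_true, if_false]
    have hnl : ¬ (PySem.Str.find "abcdefghijklmnopqrstuvwxyz" s < 0) := by omega
    simp only [hnl, if_false]
    obtain ⟨c, t, hs⟩ : ∃ c t, s.toList = c :: t := by
      cases hsl : s.toList with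
      | nil =>
        exfalso
        have : PySem.Str.isIn s "aeiou" = true := by
          rw [PySem.Str.isIn_iff_infix, hsl]
          exact List.nil_infix
        exact hv this
      | cons c t => exact ⟨c, t, rfl⟩
    have hfc : PySem.Str.find "abcdefghijklmnopqrstuvwxyz" s
        = PySem.Chars.find "abcdefghijklmnopqrstuvwxyz".toList (c :: t) := by
      rw [PySem.Str.find_eq, hs]
    rw [hfc] at hf ⊢
    obtain ⟨h26, hgetD⟩ := nv_find_facts c t hf
    have hnv : nvVowel c = false := by
      by_contra h
      have hcv : c ∈ "aeiou".toList := by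
        simp only [nvVowel, List.contains_eq_mem, Bool.not_eq_false, decide_eq_true_eq] at h
        exact h
      cases t with
      | nil => exact hv (nv_singleton_vowel_isIn s c hs hcv)
      | cons c2 t2 =>
        apply hnd
        refine ⟨by rw [hs]; simp, hv', ha, ?_⟩
        have hc5 : c = 'a' ∨ c = 'e' ∨ c = 'i' ∨ c = 'o' ∨ c = 'u' := by simpa using hcv
        rw [hs]
        rcases hc5 with h5 | h5 | h5 | h5 | h5 <;> subst h5 <;> simp
    rw [← hgetD] at hnv
    exact (nv_core _ hf h26).1 hnv

theorem nearest_vowel_changed : Claim_changed_nearest_vowel := by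
  unfold Claim_changed_nearest_vowel; decide

theorem nearest_vowel_tight : Claim_exact_nearest_vowel := by
  intro s _ hpre hD
  obtain ⟨hlen, hv, ha, hhd⟩ := hD
  have hf : 0 ≤ PySem.Str.find "abcdefghijklmnopqrstuvwxyz" s := by
    rw [PySem.Str.find_nonneg_iff]
    rw [PySem.Str.isIn_iff_infix] at ha
    exact ha
  simp only [nearest_vowel, nearest_vowel_alt]
  simp only [hv, Bool.false_eq_true, if_false]
  have hnl : ¬ (PySem.Str.find "abcdefghijklmnopqrstuvwxyz" s < 0) := by omega
  simp only [hnl, if_false]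
  obtain ⟨c, t, hs⟩ : ∃ c t, s.toList = c :: t := by
    cases hsl : s.toList with
    | nil => rw [hsl] at hlen; simp at hlen
    | cons c t => exact ⟨c, t, rfl⟩
  have hfc : PySem.Str.find "abcdefghijklmnopqrstuvwxyz" s
      = PySem.Chars.find "abcdefghijklmnopqrstuvwxyz".toList (c :: t) := by
    rw [PySem.Str.find_eq, hs]
  rw [hfc] at hf ⊢
  obtain ⟨h26, hgetD⟩ := nv_find_facts c t hf
  have hcv : nvVowel c = true := by
    rw [hs] at hhd
    simp only [List.head?_cons, List.mem_cons, List.not_mem_nil, or_false] at hhd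
    rcases hhd with h | h | h | h | h <;> rw [Option.some.injEq] at h <;> rw [h] <;> decide
  rw [← hgetD] at hcv
  exact (nv_core _ hf h26).2 hcv
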